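-- pv_equiv track=rewrite | github.com/VereLanz/my-advent-2022 | my_advent/day1.py | find_top3_calories
-- ===== SOURCE A (Python) =====
-- def find_top3_calories(inputs: list[str]) -> int:
--     current_sum = 0
--     sums = []
--     for entry in inputs:
--         if entry.isdigit():
--             current_sum += int(entry)
--         else:
--             sums.append(current_sum)
--             current_sum = 0
--     # last element might not be followed by non-digit
--     sums.append(current_sum)
--     return sum(sorted(sums)[-3:])
-- ===== SOURCE B (Python) =====
-- def _push(s, a, b, c):
--     # insert s into the descending top-3 (a >= b >= c), dropping the smallest
--     if s >= a:
--         return s, a, b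
--     if s >= b:
--         return a, s, b
--     if s >= c:
--         return a, b, s
--     return a, b, c
--
--
-- def find_top3_calories(inputs: list[str]) -> int:
--     # one pass: track the three largest group sums directly, no list, no sort
--     a = b = c = 0
--     cur = 0
--     for entry in inputs:
--         if entry.isdigit():
--             cur += int(entry)
--         else:
--             a, b, c = _push(cur, a, b, c)
--             cur = 0
--     a, b, c = _push(cur, a, b, c)
--     return a + b + c
-- ===== Notes on version B (the rewrite author's own statement) =====
-- stated objective: alternative
-- what changed: B replaces building the list of all group sums and fully sorting it with a single pass that maintains only the three largest group sums in three scalar accumulators (no list of sums, no sort; O(1) extra space).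
import Mathlib
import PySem

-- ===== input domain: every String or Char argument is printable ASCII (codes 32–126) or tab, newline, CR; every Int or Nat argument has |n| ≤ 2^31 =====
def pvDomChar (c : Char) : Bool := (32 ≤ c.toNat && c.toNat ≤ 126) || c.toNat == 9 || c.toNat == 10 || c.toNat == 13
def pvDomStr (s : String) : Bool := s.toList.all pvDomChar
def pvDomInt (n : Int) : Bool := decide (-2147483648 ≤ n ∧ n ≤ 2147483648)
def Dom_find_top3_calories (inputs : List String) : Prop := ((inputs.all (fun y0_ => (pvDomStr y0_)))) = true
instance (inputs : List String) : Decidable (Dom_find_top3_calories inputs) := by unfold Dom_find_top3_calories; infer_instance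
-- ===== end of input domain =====

-- B replaces the full sort of all group sums by a one-pass top-3 tracker in three scalars (no sums list, no sort).
-- int(entry) is only evaluated under entry.isdigit(), where PySem.Int.ofStr? is some; '.getD 0' is never taken on none on Dom.

-- ===== PORT A =====
-- one fold step of A's loop over entries: state (current_sum, sums)
def stepA (acc : Int × List Int) (entry : String) : Int × List Int :=
  if PySem.Str.strIsdigit entry then (acc.1 + (PySem.Int.ofStr? entry).getD 0, acc.2)
  else (0, acc.2 ++ [acc.1])

def find_top3_calories (inputs : List String) : Int :=
  let st := inputs.foldl stepA (0, [])
  let sums := st.2 ++ [st.1]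
  (PySem.List.slice (PySem.List.sorted sums (fun x => x) false) (some (-3)) none).sum

-- ===== PORT B =====
-- _push from Source B: insert s into the descending top-3 (a ≥ b ≥ c), dropping the smallest
def pushTriple (s a b c : Int) : Int × Int × Int :=
  if a ≤ s then (s, a, b)
  else if b ≤ s then (a, s, b)
  else if c ≤ s then (a, b, s)
  else (a, b, c)

-- one fold step of B's loop: state (a, b, c, cur)
def stepB (acc : Int × Int × Int × Int) (entry : String) : Int × Int × Int × Int :=
  if PySem.Str.strIsdigit entry then (acc.1, acc.2.1, acc.2.2.1, acc.2.2.2 + (PySem.Int.ofStr? entry).getD 0)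
  else
    let t := pushTriple acc.2.2.2 acc.1 acc.2.1 acc.2.2.1
    (t.1, t.2.1, t.2.2, 0)

def find_top3_calories_alt (inputs : List String) : Int :=
  let st := inputs.foldl stepB (0, 0, 0, 0)
  let t := pushTriple st.2.2.2 st.1 st.2.1 st.2.2.1
  t.1 + t.2.1 + t.2.2

-- ===== PRECONDITION & SPEC =====
def Spec_find_top3_calories (inputs : List String) (out : Int) : Prop := out = find_top3_calories_alt inputs
instance (inputs : List String) (out : Int) : Decidable (Spec_find_top3_calories inputs out) := by unfold Spec_find_top3_calories; infer_instance

-- ===== CLAIM (what is proved, stated in full; the proofs are below) =====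
def Claim_equal_find_top3_calories : Prop := ∀ (inputs : List String), Dom_find_top3_calories inputs → Spec_find_top3_calories inputs (find_top3_calories inputs)

-- ===== LEMMAS AND PROOFS =====

-- ghost machinery for the proof only
def triStep (t : Int × Int × Int) (s : Int) : Int × Int × Int := pushTriple s t.1 t.2.1 t.2.2

def tri (r : List Int) : Int × Int × Int := (r.getD 0 0, r.getD 1 0, r.getD 2 0)

-- descending ordered insert (proof-only; names the order of the sorted list)
def insD (x : Int) : List Int → List Int
  | [] => [x]
  | h :: t => if h ≤ x then x :: h :: t else h :: insD x t

lemma insD_perm (x : Int) (r : List Int) : (insD x r).Perm (x :: r) := by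
  induction r with
  | nil => simp [insD]
  | cons h t ih =>
      simp only [insD]
      split
      · exact List.Perm.refl _
      · exact (List.Perm.cons h ih).trans (List.Perm.swap x h t)

lemma insD_pairwise (x : Int) (r : List Int) (hr : r.Pairwise (fun a b => b ≤ a)) :
    (insD x r).Pairwise (fun a b => b ≤ a) := by
  induction r with
  | nil => simp [insD]
  | cons h t ih =>
      rw [List.pairwise_cons] at hr
      simp only [insD]
      split
      · rename_i hle
        refine List.pairwise_cons.2 ⟨?_, List.pairwise_cons.2 ⟨hr.1, hr.2⟩⟩
        intro y hy
        rw [List.mem_cons] at hy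
        rcases hy with rfl | hy
        · exact hle
        · exact le_trans (hr.1 y hy) hle
      · rename_i hgt
        refine List.pairwise_cons.2 ⟨?_, ih hr.2⟩
        intro y hy
        have hm := (insD_perm x t).mem_iff.1 hy
        rw [List.mem_cons] at hm
        rcases hm with rfl | hy'
        · omega
        · exact hr.1 y hy'

-- naming the sorted order: sorting l ++ [x] = inserting x into the sorted list (seen reversed)
lemma sorted_append_singleton (l : List Int) (x : Int) :
    PySem.List.sorted (l ++ [x]) (fun y => y) false
      = (insD x ((PySem.List.sorted l (fun y => y) false).reverse)).reverse := by
  apply PySem.List.sorted_id_eq_of_perm_of_pairwise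
  · refine (List.reverse_perm _).trans ((insD_perm x _).trans ?_)
    refine (List.Perm.cons x ((List.reverse_perm _).trans (PySem.List.sorted_perm l _ false))).trans ?_
    exact (List.perm_append_singleton x l).symm
  · rw [List.pairwise_reverse]
    apply insD_pairwise
    rw [← List.pairwise_reverse, List.reverse_reverse]
    exact PySem.List.sorted_pairwise l (fun y => y)

lemma tri_insD (x : Int) (r : List Int) (hx : 0 ≤ x) (hr : ∀ y ∈ r, 0 ≤ y) :
    tri (insD x r) = triStep (tri r) x := by
  rcases r with _ | ⟨a, _ | ⟨b, _ | ⟨c, t⟩⟩⟩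
  · simp only [insD, tri, triStep, pushTriple]
    split_ifs <;> simp_all
  · have ha := hr a (by simp)
    simp only [insD, tri, triStep, pushTriple]
    split_ifs <;> simp_all <;> omega
  · have ha := hr a (by simp)
    have hb := hr b (by simp)
    simp only [insD, tri, triStep, pushTriple]
    split_ifs <;> simp_all <;> omega
  · simp only [insD, tri, triStep, pushTriple]
    split_ifs <;> simp_all <;> omega

-- relate A's fold to a start with nonempty accumulator
lemma foldA_acc (inputs : List String) : ∀ (cur : Int) (sums : List Int),
    inputs.foldl stepA (cur, sums)
      = ((inputs.foldl stepA (cur, [])).1, sums ++ (inputs.foldl stepA (cur, [])).2) := by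
  induction inputs with
  | nil => intro cur sums; simp
  | cons e rest ih =>
      intro cur sums
      by_cases h : PySem.Str.strIsdigit e
      · simp only [List.foldl_cons, stepA, h, if_true]
        exact ih _ _
      · rw [List.foldl_cons, List.foldl_cons,
          show ∀ s : List Int, stepA (cur, s) e = (0, s ++ [cur]) from fun s => by simp only [stepA]; rw [if_neg h]]
        rw [show stepA (cur, ([] : List Int)) e = (0, [] ++ [cur]) from by simp only [stepA]; rw [if_neg h]]
        rw [ih 0 (sums ++ [cur]), ih 0 ([] ++ [cur])]
        simp

lemma opt_nat_nonneg' (o : Option Nat) : 0 ≤ (o.map ((fun n : Int => n) ∘ Nat.cast)).getD 0 := by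
  cases o <;> simp

lemma digit_not_space (c : Char) (hc : PySem.Chars.isdigit c = true) :
    PySem.Int.isIntSpace c = false := by
  simp only [PySem.Chars.isdigit, Bool.and_eq_true, decide_eq_true_eq] at hc
  simp only [PySem.Int.isIntSpace, Bool.or_eq_false_iff, decide_eq_false_iff_not]
  refine ⟨⟨⟨⟨⟨?_, ?_⟩, ?_⟩, ?_⟩, ?_⟩, ?_⟩ <;> rintro rfl <;> exact absurd hc.1 (by decide)

lemma ofChars?_nonneg_of_isdigit (cs : List Char) (h : PySem.Chars.strIsdigit cs = true) :
    0 ≤ (PySem.Int.ofChars? cs).getD 0 := by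
  simp only [PySem.Chars.strIsdigit, Bool.and_eq_true, List.all_eq_true] at h
  obtain ⟨hne, hall⟩ := h
  rcases hcs : cs with _ | ⟨c, rest⟩
  · subst hcs; simp at hne
  subst hcs
  have hc : PySem.Chars.isdigit c = true := hall c (by simp)
  have h1 : List.dropWhile PySem.Int.isIntSpace (c :: rest) = c :: rest :=
    List.dropWhile_cons_of_neg (by simp [digit_not_space c hc])
  have h2 : List.dropWhile PySem.Int.isIntSpace (c :: rest).reverse = (c :: rest).reverse := by
    rcases hrev : (c :: rest).reverse with _ | ⟨d, tl⟩
    · simp at hrev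
    have hd : d ∈ c :: rest := by rw [← List.mem_reverse, hrev]; simp
    exact List.dropWhile_cons_of_neg (by simp [digit_not_space d (hall d hd)])
  simp only [PySem.Int.ofChars?, h1, h2, List.reverse_reverse]
  split
  · rename_i ds heq
    rw [List.cons.injEq] at heq
    exact absurd (heq.1 ▸ hc) (by decide)
  · rename_i ds heq
    rw [List.cons.injEq] at heq
    exact absurd (heq.1 ▸ hc) (by decide)
  · simp only [bind_pure_comp, Option.map_map, Option.map_eq_map]
    exact opt_nat_nonneg' _

lemma ofStr?_nonneg_of_isdigit (s : String) (h : PySem.Str.strIsdigit s = true) :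
    0 ≤ (PySem.Int.ofStr? s).getD 0 := by
  rw [PySem.Str.strIsdigit_eq] at h
  simp only [PySem.Int.ofStr?]
  exact ofChars?_nonneg_of_isdigit s.toList h

lemma foldA_nonneg (inputs : List String) : ∀ (cur : Int), 0 ≤ cur →
    0 ≤ (inputs.foldl stepA (cur, [])).1 ∧ ∀ y ∈ (inputs.foldl stepA (cur, [])).2, 0 ≤ y := by
  induction inputs with
  | nil => intro cur h; simpa using h
  | cons e rest ih =>
      intro cur h
      by_cases hd : PySem.Str.strIsdigit e
      · simp only [List.foldl_cons, stepA, hd, if_true]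
        exact ih _ (by have := ofStr?_nonneg_of_isdigit e hd; omega)
      · rw [List.foldl_cons, show stepA (cur, ([] : List Int)) e = (0, [cur]) from by simp only [stepA]; rw [if_neg hd]; simp]
        rw [foldA_acc]
        refine ⟨(ih 0 le_rfl).1, ?_⟩
        intro y hy
        rw [List.mem_append, List.mem_singleton] at hy
        rcases hy with rfl | hy
        · exact h
        · exact (ih 0 le_rfl).2 y hy

-- main fold correspondence: B's fold computes (triStep-fold over A's sums, A's cur)
lemma foldB_eq_foldA (inputs : List String) : ∀ (t : Int × Int × Int) (cur : Int),
    inputs.foldl stepB (t.1, t.2.1, t.2.2, cur)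
      = (((inputs.foldl stepA (cur, [])).2.foldl triStep t).1,
         ((inputs.foldl stepA (cur, [])).2.foldl triStep t).2.1,
         ((inputs.foldl stepA (cur, [])).2.foldl triStep t).2.2,
         (inputs.foldl stepA (cur, [])).1) := by
  induction inputs with
  | nil => intro t cur; simp
  | cons e rest ih =>
      intro t cur
      by_cases hd : PySem.Str.strIsdigit e
      · simp only [List.foldl_cons, stepA, stepB, hd, if_true]
        exact ih t _
      · rw [List.foldl_cons, List.foldl_cons,
          show stepA (cur, ([] : List Int)) e = (0, [cur]) from by
            simp only [stepA]; rw [if_neg hd]; simp,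
          show stepB (t.1, t.2.1, t.2.2, cur) e
              = ((triStep t cur).1, (triStep t cur).2.1, (triStep t cur).2.2, 0) from by
            simp only [stepB, triStep]; rw [if_neg hd]]
        rw [foldA_acc, ih (triStep t cur) 0]
        simp

-- the triple fold computes the three largest values of the reverse-sorted list
lemma foldl_triStep_eq_tri (l : List Int) (hl : ∀ y ∈ l, 0 ≤ y) :
    l.foldl triStep (0, 0, 0) = tri ((PySem.List.sorted l (fun y => y) false).reverse) := by
  induction l using List.reverseRecOn with
  | nil => simp [tri, PySem.List.sorted]
  | append_singleton l x ih =>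
      have hx : 0 ≤ x := hl x (by simp)
      have hl' : ∀ y ∈ l, 0 ≤ y := fun y hy => hl y (by simp [hy])
      rw [List.foldl_append, List.foldl_cons, List.foldl_nil, ih hl',
        sorted_append_singleton, List.reverse_reverse, tri_insD x _ hx]
      intro y hy
      rw [List.mem_reverse, PySem.List.mem_sorted] at hy
      exact hl' y hy

-- sum of the last ≤3 elements of a list = the summed tri of its reverse
lemma sum_drop_eq_tri (s : List Int) :
    (s.drop (s.length - 3)).sum = (tri s.reverse).1 + (tri s.reverse).2.1 + (tri s.reverse).2.2 := by
  have h : s.drop (s.length - 3) = (s.reverse.take 3).reverse := by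
    rw [List.take_reverse, List.reverse_reverse]
  rw [h, List.sum_reverse]
  rcases hr : s.reverse with _ | ⟨a, _ | ⟨b, _ | ⟨c, t⟩⟩⟩ <;> simp [tri] <;> try ring

-- ===== VERDICT (by name: the statement is the Claim_ definition above) =====
theorem find_top3_calories_spec : Claim_equal_find_top3_calories := by
  intro inputs _
  have hA := foldA_nonneg inputs 0 le_rfl
  have hB := foldB_eq_foldA inputs (0, 0, 0) 0
  simp only [Spec_find_top3_calories, find_top3_calories, find_top3_calories_alt]
  simp only at hB
  rw [hB]
  have hnn : ∀ y ∈ (inputs.foldl stepA (0, [])).2 ++ [(inputs.foldl stepA (0, [])).1], 0 ≤ y := by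
    intro y hy
    rw [List.mem_append, List.mem_singleton] at hy
    rcases hy with hy | rfl
    · exact hA.2 y hy
    · exact hA.1
  have hfold := foldl_triStep_eq_tri _ hnn
  rw [List.foldl_append, List.foldl_cons, List.foldl_nil] at hfold
  simp only [triStep] at hfold
  rw [PySem.List.slice_from_neg_ofNat _ 3 (by omega), sum_drop_eq_tri, hfold]
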